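-- pv_equiv track=rewrite | github.com/kadarsh2k00/data-structures-and-algorithms-nanodegree--nd256 | Introduction/Python Refresher/Control flow quiz 1.py | smallest_positive
-- ===== SOURCE A (Python) =====
-- def smallest_positive(in_list):
--      s=None
--      for x in in_list:
--           if x<=0:
--                continue
--
--           elif s is None:
--                s=x
--           elif(x<s):
--                s=x
--      return s
-- ===== SOURCE B (Python) =====
-- def smallest_positive(in_list):
--     for x in sorted(in_list):
--         if x > 0:
--             return x
--     return None
-- ===== Notes on version B (the rewrite author's own statement) =====
-- stated objective: alternative
-- what changed: Sorts the list and returns the first strictly positive element of the sorted order (early exit), instead of A's fused running-minimum scan with optional state.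
import Mathlib
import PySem

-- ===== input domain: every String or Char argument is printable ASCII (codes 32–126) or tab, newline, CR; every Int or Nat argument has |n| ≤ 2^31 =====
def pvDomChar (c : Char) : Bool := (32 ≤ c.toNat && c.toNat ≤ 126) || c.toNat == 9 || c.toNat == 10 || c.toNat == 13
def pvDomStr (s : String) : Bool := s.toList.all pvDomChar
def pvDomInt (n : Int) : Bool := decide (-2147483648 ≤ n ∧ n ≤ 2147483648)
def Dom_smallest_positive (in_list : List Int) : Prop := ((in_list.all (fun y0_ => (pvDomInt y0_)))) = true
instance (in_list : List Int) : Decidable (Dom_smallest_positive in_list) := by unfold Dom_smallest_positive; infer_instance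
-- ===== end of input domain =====

-- B sorts the list and returns its first strictly positive element, instead of A's fused running-minimum scan (objective: alternative).


-- ===== PORT A =====
-- loop body of A: skip non-positives, initialise s, then keep the smaller
def spStep (s : Option Int) (x : Int) : Option Int :=
  if x ≤ 0 then s
  else match s with
    | none => some x
    | some m => if x < m then some x else some m

def smallest_positive (in_list : List Int) : Option Int :=
  in_list.foldl spStep none

-- ===== PORT B =====
-- B's loop: scan the sorted list, return the first strictly positive element
def spFirstPos : List Int → Option Int
  | [] => none
  | x :: t => if 0 < x then some x else spFirstPos t

def smallest_positive_alt (in_list : List Int) : Option Int :=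
  spFirstPos (PySem.List.sorted in_list (fun x => x) false)

-- ===== PRECONDITION & SPEC =====
def Spec_smallest_positive (in_list : List Int) (out : Option Int) : Prop := out = smallest_positive_alt in_list
instance (in_list : List Int) (out : Option Int) : Decidable (Spec_smallest_positive in_list out) := by unfold Spec_smallest_positive; infer_instance

-- ===== CLAIM (what is proved, stated in full; the proofs are below) =====
def Claim_equal_smallest_positive : Prop := ∀ (in_list : List Int), Dom_smallest_positive in_list → Spec_smallest_positive in_list (smallest_positive in_list)

-- ===== LEMMAS AND PROOFS =====
-- A's loop body is commutative, so A's fold is permutation-invariant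
theorem spStep_eq (s : Option Int) (x : Int) :
    spStep s x = if x ≤ 0 then s else some (min (s.getD x) x) := by
  rcases s with _ | m <;> simp only [spStep, Option.getD] <;> split_ifs <;>
    simp_all [min_def]

theorem spStep_comm (s : Option Int) (x y : Int) :
    spStep (spStep s x) y = spStep (spStep s y) x := by
  by_cases hx : x ≤ 0 <;> by_cases hy : y ≤ 0 <;> rcases s with _ | m <;>
    simp [spStep_eq, hx, hy, min_self, min_comm, min_left_comm]

theorem spFold_perm {l1 l2 : List Int} (h : l1.Perm l2) (s : Option Int) :
    l1.foldl spStep s = l2.foldl spStep s := by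
  induction h generalizing s with
  | nil => rfl
  | cons x _ ih => simp only [List.foldl_cons]; exact ih _
  | swap x y l => simp only [List.foldl_cons, spStep_comm]
  | trans _ _ ih1 ih2 => exact (ih1 s).trans (ih2 s)

-- once A holds a value not exceeded by any remaining element, it keeps it
theorem spFold_keep (t : List Int) (m : Int) (h : ∀ y ∈ t, m ≤ y) :
    t.foldl spStep (some m) = some m := by
  induction t with
  | nil => rfl
  | cons y t ih =>
    have hy : m ≤ y := h y (by simp)
    have ht : ∀ z ∈ t, m ≤ z := fun z hz => h z (by simp [hz])
    simp only [List.foldl_cons, spStep]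
    split_ifs with h1 h2
    · exact ih ht
    · omega
    · exact ih ht

-- on a ≤-sorted list, A's fold returns the first positive element
theorem spFold_sorted (s : List Int) (hs : s.Pairwise (· ≤ ·)) :
    s.foldl spStep none = spFirstPos s := by
  induction s with
  | nil => rfl
  | cons x t ih =>
    rcases List.pairwise_cons.mp hs with ⟨hx, ht⟩
    by_cases h0 : 0 < x
    · have : spStep none x = some x := by simp [spStep]; omega
      simp only [List.foldl_cons, this, spFirstPos, if_pos h0]
      exact spFold_keep t x hx
    · have : spStep none x = none := by simp [spStep]; omega
      simp only [List.foldl_cons, this, spFirstPos, if_neg h0]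
      exact ih ht

-- ===== VERDICT (by name: the statement is the Claim_ definition above) =====
theorem smallest_positive_spec : Claim_equal_smallest_positive := by
  intro l _
  show smallest_positive l = smallest_positive_alt l
  unfold smallest_positive smallest_positive_alt
  rw [spFold_perm (PySem.List.sorted_perm l (fun x => x) false).symm]
  exact spFold_sorted _ (PySem.List.sorted_pairwise l (fun x => x))
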